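-- pv_equiv track=rewrite | github.com/GitdohunKim/boj-programmers-solution | 프로그래머스/1/12982. 예산/예산.py | solution
-- ===== SOURCE A (Python) =====
-- def solution(d, budget):
--     result = 0
--     count = 0
--     for i in range(len(d)):
--         result += sorted(d)[i]
--         if result <= budget:
--             count += 1
--     return count
-- ===== SOURCE B (Python) =====
-- def solution(d, budget):
--     pool = list(d)
--     total = 0
--     count = 0
--     while pool:
--         m = min(pool)
--         pool.remove(m)
--         total += m
--         if total <= budget:
--             count += 1
--     return count
-- ===== Notes on version B (the rewrite author's own statement) =====
-- stated objective: faster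
-- what changed: A re-sorts the whole list on every iteration and indexes into it; B never sorts at all: it greedily extracts the minimum from a shrinking pool (selection), accumulating the running total and counting while it stays within budget.
import Mathlib
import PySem

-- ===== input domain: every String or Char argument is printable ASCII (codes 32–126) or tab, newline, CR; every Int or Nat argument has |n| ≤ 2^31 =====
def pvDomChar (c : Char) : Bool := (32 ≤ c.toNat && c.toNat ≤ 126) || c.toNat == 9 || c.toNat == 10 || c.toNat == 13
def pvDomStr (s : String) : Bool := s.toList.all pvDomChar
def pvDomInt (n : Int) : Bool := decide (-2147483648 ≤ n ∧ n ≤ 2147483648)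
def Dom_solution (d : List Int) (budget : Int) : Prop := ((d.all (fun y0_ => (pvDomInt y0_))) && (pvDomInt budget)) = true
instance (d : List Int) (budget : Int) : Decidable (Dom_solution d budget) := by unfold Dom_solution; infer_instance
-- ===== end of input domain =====

-- B replaces A's re-sort-and-index loop by sort-free selection: repeatedly extract the minimum from a pool, accumulate and count (alternative algorithm, no sorting).


-- ===== PORT A =====
-- for i in range(len(d)): result += sorted(d)[i]; if result <= budget: count += 1
def solution (d : List Int) (budget : Int) : Int :=
  ((PySem.List.pyRange 0 (d.length : Int) 1).foldl
    (fun (st : Int × Int) i =>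
      (st.1 + PySem.List.pyGetD (PySem.List.sorted d (fun x => x) false) i 0,
       if st.1 + PySem.List.pyGetD (PySem.List.sorted d (fun x => x) false) i 0 ≤ budget
       then st.2 + 1 else st.2))
    (0, 0)).2

-- ===== PORT B =====
-- while pool: m = min(pool); pool.remove(m); total += m; if total <= budget: count += 1
-- Python's min/list.remove are PySem.List.min?/remove?; remove? never misses since m ∈ pool.
def selLoop (budget : Int) (pool : List Int) (total count : Int) : Int :=
  match hm : PySem.List.min? pool (fun x => x) with
  | none => count
  | some m =>
      selLoop budget ((PySem.List.remove? pool m).getD []) (total + m)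
        (if total + m ≤ budget then count + 1 else count)
termination_by pool.length
decreasing_by
  have hmem : m ∈ pool := PySem.List.min?_mem hm
  rw [PySem.List.remove?_eq_some_erase pool m hmem]
  have := List.length_erase_of_mem hmem
  have := List.length_pos_of_mem hmem
  simp only [Option.getD_some]
  omega

def solution_alt (d : List Int) (budget : Int) : Int :=
  selLoop budget d 0 0

-- ===== PRECONDITION & SPEC =====
def Spec_solution (d : List Int) (budget : Int) (out : Int) : Prop := out = solution_alt d budget
instance (d : List Int) (budget : Int) (out : Int) : Decidable (Spec_solution d budget out) := by unfold Spec_solution; infer_instance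

-- ===== CLAIM =====
def Claim_equal_solution : Prop := ∀ (d : List Int) (budget : Int), Dom_solution d budget → Spec_solution d budget (solution d budget)

-- ===== LEMMAS AND PROOFS =====

/-- canonical counting loop over an (already ordered) list -/
def cntLoop (budget : Int) : List Int → Int → Int → Int
  | [], _, count => count
  | x :: xs, total, count =>
      cntLoop budget xs (total + x) (if total + x ≤ budget then count + 1 else count)

theorem foldl_eq_cnt (budget : Int) (s : List Int) : ∀ (total count : Int),
    (s.foldl (fun (st : Int × Int) x =>
        (st.1 + x, if st.1 + x ≤ budget then st.2 + 1 else st.2)) (total, count)).2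
      = cntLoop budget s total count := by
  induction s with
  | nil => intro t c; simp [cntLoop]
  | cons x xs ih => intro t c; simp only [List.foldl_cons, cntLoop]; exact ih _ _

theorem sel_eq_cnt (budget : Int) : ∀ (n : Nat) (pool : List Int), pool.length = n →
    ∀ (total count : Int),
    selLoop budget pool total count
      = cntLoop budget (PySem.List.sorted pool (fun x => x) false) total count := by
  intro n
  induction n using Nat.strong_induction_on with
  | _ n ih =>
    intro pool hn total count
    match hm : PySem.List.min? pool (fun x => x) with
    | none =>
        have hp : pool = [] := (PySem.List.min?_eq_none_iff _ _).mp hm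
        subst hp
        rw [selLoop.eq_def]
        have hnil : PySem.List.sorted ([] : List Int) (fun x => x) false = [] :=
          (PySem.List.sorted_eq_nil_iff _ _ _).mpr rfl
        rw [hnil]
        split
        · rfl
        · rename_i m' heq; rw [hm] at heq; exact absurd heq (by simp)
    | some m =>
        have hmem : m ∈ pool := PySem.List.min?_mem hm
        have hrem : PySem.List.remove? pool m = some (pool.erase m) :=
          PySem.List.remove?_eq_some_erase pool m hmem
        -- name the sorted list and its head
        have hsne : PySem.List.sorted pool (fun x => x) false ≠ [] := by
          intro h
          have : pool = [] := (PySem.List.sorted_eq_nil_iff _ _ _).mp h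
          subst this; simp at hmem
        obtain ⟨h, t, hs⟩ := List.exists_cons_of_ne_nil hsne
        -- head equals the minimum
        have hhd : h = m := by
          have h1 : ∀ y ∈ pool, m ≤ y := PySem.List.min?_isMin hm
          have h2 : ∀ y ∈ pool, h ≤ y := PySem.List.key_head_sorted_le pool _ hs
          have hhp : h ∈ pool := by
            have : h ∈ PySem.List.sorted pool (fun x => x) false := by
              rw [hs]; exact List.mem_cons_self
            exact (PySem.List.mem_sorted _ _ _ _).mp this
          exact le_antisymm (h2 m hmem) (h1 h hhp)
        -- sorted of the reduced pool is the tail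
        have hperm : (PySem.List.sorted pool (fun x => x) false).Perm pool :=
          PySem.List.sorted_perm _ _ _
        have htperm : t.Perm (pool.erase m) := by
          have := (List.Perm.erase m hperm).symm
          rw [hs, hhd, List.erase_cons_head] at this
          exact this.symm
        have htpair : t.Pairwise (fun a b : Int => a ≤ b) := by
          have := PySem.List.sorted_pairwise pool (fun x : Int => x)
          rw [hs] at this
          exact (List.pairwise_cons.mp this).2
        have hst : PySem.List.sorted (pool.erase m) (fun x => x) false = t :=
          PySem.List.sorted_id_eq_of_perm_of_pairwise _ _ htperm htpair
        have hlt : (pool.erase m).length < n := by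
          have := List.length_erase_of_mem hmem
          have := List.length_pos_of_mem hmem
          omega
        rw [selLoop.eq_def]
        split
        · rename_i heq; rw [hm] at heq; exact absurd heq (by simp)
        · rename_i m' heq
          rw [hm] at heq; injection heq with hmm; subst hmm
          rw [hrem, Option.getD_some, ih _ hlt _ rfl, hst, hs, hhd]
          simp [cntLoop]

-- ===== VERDICT =====
theorem solution_spec : Claim_equal_solution := by
  intro d budget _
  unfold Spec_solution solution solution_alt
  have hlen : ((d.length : Int)) = ((PySem.List.sorted d (fun x => x) false).length : Int) := by
    rw [PySem.List.length_sorted]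
  rw [hlen, PySem.List.foldl_pyRange_zero_pyGetD'
      (xs := PySem.List.sorted d (fun x => x) false)
      (f := fun (st : Int × Int) x =>
        (st.1 + x, if st.1 + x ≤ budget then st.2 + 1 else st.2))]
  rw [foldl_eq_cnt, sel_eq_cnt budget d.length d rfl]
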